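-- pv_equiv track=rewrite | github.com/Ikerlb/kattis | typo/sol.py | hashes
-- ===== SOURCE A (Python) =====
-- def f(a):
--     return (ord(a) - ord('a')) + 1
--
-- def _hash(s, p):
--     return sum((f(a) * pow(26, i)) % p for i, a in enumerate(reversed(s)))
--
-- def hashes(s, p):
--     hl = 0
--     hr = _hash(s, p)
--     n = len(s) - 1
--     for i,c in enumerate(s):
--
--         comp = (f(c) * pow(26, n - i))
--         compm1 = (f(c) * pow(26, n - i - 1))
--         hr -= (comp % p)
--         hmo = (hl + hr) % p
--         yield hmo
--         hl += (compm1 % p)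
-- ===== SOURCE B (Python) =====
-- def hashes(s, p):
--     # O(n): incremental prefix hashes forward, then one backward pass that
--     # maintains the suffix hash and the power of 26 mod p incrementally
--     # (no calls to pow, no big-integer powers).  Returns a list.
--     vals = [ord(c) - ord('a') + 1 for c in s]
--     pre = [0]
--     h = 0
--     for v in vals:
--         h = (h * 26 + v) % p
--         pre.append(h)
--     res = []
--     suf = 0
--     pw = 1
--     for h, v in zip(reversed(pre[:-1]), reversed(vals)):
--         res.append((h * pw + suf) % p)
--         suf = (suf + v * pw) % p
--         pw = pw * 26 % p
--     res.reverse()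
--     return res
-- ===== Notes on version B (the rewrite author's own statement) =====
-- stated objective: faster
-- what changed: A recomputes pow(26, k) as a full big integer (plus an O(n) _hash prepass of pow calls) at every position; B makes one forward pass collecting prefix hashes mod p and one backward pass that maintains the suffix hash and the power of 26 mod p incrementally, with no pow calls and no big integers.
import Mathlib
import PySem

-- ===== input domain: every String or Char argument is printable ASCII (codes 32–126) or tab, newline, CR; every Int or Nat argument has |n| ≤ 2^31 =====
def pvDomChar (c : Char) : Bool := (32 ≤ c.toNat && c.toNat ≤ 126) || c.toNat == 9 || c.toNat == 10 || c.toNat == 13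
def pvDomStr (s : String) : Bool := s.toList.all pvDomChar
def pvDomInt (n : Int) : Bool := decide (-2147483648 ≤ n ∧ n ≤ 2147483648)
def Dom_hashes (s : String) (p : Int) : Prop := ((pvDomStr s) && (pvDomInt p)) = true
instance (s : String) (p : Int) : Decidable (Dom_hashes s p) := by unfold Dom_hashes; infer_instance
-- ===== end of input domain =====

-- B replaces A's per-position big-integer pow(26, k) calls by two linear passes that keep
-- the power of 26, the prefix hash and the suffix hash mod p incrementally (objective: faster).
-- A is a generator; the equivalence is about the fully consumed list of yielded values.

-- ===== PORT A =====
-- f(a) = (ord(a) - ord('a')) + 1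
def pvF (a : Char) : Int := ((a.toNat : Int) - 97) + 1

-- _hash(s, p) = sum((f(a) * pow(26, i)) % p for i, a in enumerate(reversed(s)))
def pvHashA (s : String) (p : Int) : Int :=
  (PySem.List.enumerate s.toList.reverse).foldl
    (fun acc ia => acc + PySem.Int.mod (pvF ia.2 * 26 ^ ia.1.toNat) p) 0

-- the generator's loop: i is the enumerate counter, m = len(s); Python's exponents
-- n - i = m - 1 - i and n - i - 1 = m - 2 - i (Nat subtraction agrees for every reachable i).
-- At the last iteration (i = m - 1) Python's pow(26, -1) is the float 1/26, which is added
-- into hl AFTER the last yield and can never reach an output: it is ported as 0 (dead state).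
def pvLoopA (p : Int) (m : Nat) : Nat → List Char → Int → Int → List Int
  | _, [], _, _ => []
  | i, c :: rest, hl, hr =>
      let comp := pvF c * 26 ^ (m - 1 - i)
      let compm1 := if i + 2 ≤ m then pvF c * 26 ^ (m - 2 - i) else 0
      let hr' := hr - PySem.Int.mod comp p
      let hmo := PySem.Int.mod (hl + hr') p
      hmo :: pvLoopA p m (i + 1) rest (hl + PySem.Int.mod compm1 p) hr'

def hashes (s : String) (p : Int) : List Int :=
  pvLoopA p s.toList.length 0 s.toList 0 (pvHashA s p)

-- ===== PORT B =====
def hashes_alt (s : String) (p : Int) : List Int :=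
  let vals := s.toList.map (fun c => ((c.toNat : Int) - 97) + 1)
  -- forward pass: pre collects the prefix hashes mod p (pre[-1] carried as st.2)
  let fwd := vals.foldl
    (fun (st : List Int × Int) v =>
      let h := PySem.Int.mod (st.2 * 26 + v) p
      (st.1 ++ [h], h)) ([0], 0)
  let pre := fwd.1
  -- backward pass over zip(reversed(pre[:-1]), reversed(vals)): res, suf, pw incremental
  let bwd := (pre.dropLast.reverse.zip vals.reverse).foldl
    (fun (st : List Int × Int × Int) hv =>
      (st.1 ++ [PySem.Int.mod (hv.1 * st.2.2 + st.2.1) p],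
       PySem.Int.mod (st.2.1 + hv.2 * st.2.2) p,
       PySem.Int.mod (st.2.2 * 26) p)) ([], 0, 1)
  bwd.1.reverse

-- ===== PRECONDITION & SPEC =====
-- Pre_ excludes only p = 0 with a nonempty string, where Python's '% p' raises ZeroDivisionError.
def Pre_hashes (s : String) (p : Int) : Prop := s.toList = [] ∨ p ≠ 0
instance (s : String) (p : Int) : Decidable (Pre_hashes s p) := by unfold Pre_hashes; infer_instance
def pvWitness_hashes : String × Int := ("ab", 7)

def Spec_hashes (s : String) (p : Int) (out : List Int) : Prop := out = hashes_alt s p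
instance (s : String) (p : Int) (out : List Int) : Decidable (Spec_hashes s p out) := by unfold Spec_hashes; infer_instance

-- ===== CLAIM (what is proved, stated in full; the proofs are below) =====
def Claim_equal_hashes : Prop := ∀ (s : String) (p : Int), Dom_hashes s p → Pre_hashes s p → Spec_hashes s p (hashes s p)

-- ===== LEMMAS AND PROOFS =====

-- exact (unreduced) base-26 hash of a value list, big-endian: pvH [v0,…,v(r-1)] = Σ vj·26^(r-1-j)
def pvH (v : List Int) : Int := v.foldl (fun h x => h * 26 + x) 0

-- little-endian companion: pvE [v0,…] = Σ vj·26^j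
def pvE : List Int → Int
  | [] => 0
  | x :: t => x + 26 * pvE t

-- the common closed form of entry i of both programs
def pvTarget (v : List Int) (p : Int) (i : Nat) : Int :=
  PySem.Int.mod (pvH (v.take i) * 26 ^ (v.length - 1 - i) + pvH (v.drop (i + 1))) p

lemma pvH_aux (t : List Int) : ∀ a : Int, t.foldl (fun h x => h * 26 + x) a = a * 26 ^ t.length + pvH t := by
  induction t with
  | nil => intro a; simp [pvH]
  | cons x t ih =>
      intro a
      simp only [List.foldl_cons, pvH, List.length_cons]
      rw [ih (a * 26 + x), ih (0 * 26 + x)]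
      ring

lemma pvH_cons (x : Int) (t : List Int) : pvH (x :: t) = x * 26 ^ t.length + pvH t := by
  simpa [pvH] using pvH_aux t x

lemma pvH_append_singleton (a : List Int) (x : Int) : pvH (a ++ [x]) = pvH a * 26 + x := by
  simp [pvH, List.foldl_append]

lemma pvE_append_singleton (a : List Int) (x : Int) : pvE (a ++ [x]) = pvE a + x * 26 ^ a.length := by
  induction a with
  | nil => simp [pvE]
  | cons y a ih => simp [pvE, ih]; ring

lemma pvE_reverse (l : List Int) : pvE l.reverse = pvH l := by
  induction l with
  | nil => simp [pvE, pvH]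
  | cons x t ih =>
      simp only [List.reverse_cons, pvE_append_singleton, ih, pvH_cons, List.length_reverse]
      ring

-- Python's % respects congruence mod p
lemma pvMod_modEq (x p : Int) : Int.ModEq p (PySem.Int.mod x p) x := by
  have h := PySem.Int.floordiv_mul_add_mod x p
  have : p ∣ x - PySem.Int.mod x p := ⟨PySem.Int.floordiv x p, by linarith⟩
  exact (Int.modEq_iff_dvd.mpr this)

lemma pvModCongr {p a b : Int} (hp : p ≠ 0) (h : Int.ModEq p a b) :
    PySem.Int.mod a p = PySem.Int.mod b p := by
  have hcong : Int.ModEq p (PySem.Int.mod a p) (PySem.Int.mod b p) :=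
    ((pvMod_modEq a p).trans h).trans (pvMod_modEq b p).symm
  have hdvd : p ∣ PySem.Int.mod b p - PySem.Int.mod a p := Int.ModEq.dvd hcong
  rcases lt_trichotomy p 0 with hneg | hzero | hpos
  · have ha := PySem.Int.mod_neg_bounds a hneg
    have hb := PySem.Int.mod_neg_bounds b hneg
    have habs : |PySem.Int.mod b p - PySem.Int.mod a p| < -p := by
      rcases abs_cases (PySem.Int.mod b p - PySem.Int.mod a p) with ⟨h1, _⟩ | ⟨h1, _⟩ <;> omega
    have := Int.eq_zero_of_abs_lt_dvd ((neg_dvd).mpr hdvd) habs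
    omega
  · exact absurd hzero hp
  · have ha1 := PySem.Int.mod_nonneg a hpos
    have ha2 := PySem.Int.mod_lt a hpos
    have hb1 := PySem.Int.mod_nonneg b hpos
    have hb2 := PySem.Int.mod_lt b hpos
    have habs : |PySem.Int.mod b p - PySem.Int.mod a p| < p := by
      rcases abs_cases (PySem.Int.mod b p - PySem.Int.mod a p) with ⟨h1, _⟩ | ⟨h1, _⟩ <;> omega
    have := Int.eq_zero_of_abs_lt_dvd hdvd habs
    omega

lemma pvHashA_cong (p : Int) (l : List Char) :
    ∀ (k : Nat) (acc : Int),
      Int.ModEq p ((PySem.List.enumerate l (k : Int)).foldl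
          (fun acc ia => acc + PySem.Int.mod (pvF ia.2 * 26 ^ ia.1.toNat) p) acc)
        (acc + 26 ^ k * pvE (l.map pvF)) := by
  induction l with
  | nil => intro k acc; simp [PySem.List.enumerate, pvE]
  | cons x t ih =>
      intro k acc
      rw [PySem.List.enumerate_cons]
      simp only [List.foldl_cons]
      have h1 : ((k : Int) + 1) = ((k + 1 : Nat) : Int) := by push_cast; ring
      rw [h1]
      refine (ih (k + 1) _).trans ?_
      have hm : Int.ModEq p (PySem.Int.mod (pvF x * 26 ^ ((k : Int)).toNat) p) (pvF x * 26 ^ k) := by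
        simpa using pvMod_modEq (pvF x * 26 ^ k) p
      have hrw : acc + 26 ^ k * pvE ((x :: t).map pvF)
          = (acc + pvF x * 26 ^ k) + 26 ^ (k + 1) * pvE (t.map pvF) := by
        simp [pvE]; ring
      rw [hrw]
      exact Int.ModEq.add_right _ (Int.ModEq.add_left acc hm)

lemma pvLoopA_spec (p : Int) (hp : p ≠ 0) (v : List Int) :
    ∀ (cs : List Char) (k : Nat) (hl hr : Int),
      k + cs.length = v.length →
      cs.map pvF = v.drop k →
      (k < v.length → Int.ModEq p hl (pvH (v.take k) * 26 ^ (v.length - 1 - k))) →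
      Int.ModEq p hr (pvH (v.drop k)) →
      pvLoopA p v.length k cs hl hr = (List.range cs.length).map (fun t => pvTarget v p (k + t)) := by
  intro cs
  induction cs with
  | nil =>
      intro k hl hr _ _ _ _
      simp [pvLoopA]
  | cons c rest ih =>
      intro k hl hr hlen hmap hhl hhr
      have hlen' : k + (rest.length + 1) = v.length := by simpa using hlen
      have hk : k < v.length := by omega
      have hdropk : v.drop k = pvF c :: rest.map pvF := by rw [← hmap]; simp
      have hdropk1 : v.drop (k + 1) = rest.map pvF := by
        rw [← List.tail_drop, hdropk]; rfl
      have hgetk : v[k]? = some (pvF c) := by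
        rw [← List.head?_drop, hdropk]; rfl
      have htake : v.take (k + 1) = v.take k ++ [pvF c] := by
        rw [List.take_add_one, hgetk]; rfl
      have hrlen : (rest.map pvF).length = v.length - 1 - k := by
        simp; omega
      -- congruence for hr'
      have hHdrop : pvH (v.drop k) = pvF c * 26 ^ (v.length - 1 - k) + pvH (v.drop (k + 1)) := by
        rw [hdropk, pvH_cons, hrlen, hdropk1]
      have hhr' : Int.ModEq p (hr - PySem.Int.mod (pvF c * 26 ^ (v.length - 1 - k)) p)
          (pvH (v.drop (k + 1))) := by
        have := Int.ModEq.sub hhr (pvMod_modEq (pvF c * 26 ^ (v.length - 1 - k)) p).symm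
        calc hr - PySem.Int.mod (pvF c * 26 ^ (v.length - 1 - k)) p
            ≡ pvH (v.drop k) - pvF c * 26 ^ (v.length - 1 - k) [ZMOD p] :=
              Int.ModEq.sub hhr (pvMod_modEq (pvF c * 26 ^ (v.length - 1 - k)) p)
          _ = pvH (v.drop (k + 1)) := by rw [hHdrop]; ring
      -- head value
      have hhead : PySem.Int.mod (hl + (hr - PySem.Int.mod (pvF c * 26 ^ (v.length - 1 - k)) p)) p
          = pvTarget v p k := by
        apply pvModCongr hp
        exact Int.ModEq.add (hhl hk) hhr'
      -- hl' congruence (only needed when k + 1 < v.length)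
      have hhl' : k + 1 < v.length →
          Int.ModEq p (hl + PySem.Int.mod (if k + 2 ≤ v.length then pvF c * 26 ^ (v.length - 2 - k) else 0) p)
            (pvH (v.take (k + 1)) * 26 ^ (v.length - 1 - (k + 1))) := by
        intro hk1
        have hg : k + 2 ≤ v.length := by omega
        rw [if_pos hg]
        have hpw : (26 : Int) ^ (v.length - 1 - k) = 26 ^ (v.length - 2 - k) * 26 := by
          rw [← pow_succ]
          congr 1
          omega
        have heq : pvH (v.take (k + 1)) * 26 ^ (v.length - 1 - (k + 1))
            = pvH (v.take k) * 26 ^ (v.length - 1 - k) + pvF c * 26 ^ (v.length - 2 - k) := by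
          rw [htake, pvH_append_singleton, hpw]
          have : v.length - 1 - (k + 1) = v.length - 2 - k := by omega
          rw [this]; ring
        rw [heq]
        exact Int.ModEq.add (hhl hk) (pvMod_modEq (pvF c * 26 ^ (v.length - 2 - k)) p)
      have htail := ih (k + 1)
        (hl + PySem.Int.mod (if k + 2 ≤ v.length then pvF c * 26 ^ (v.length - 2 - k) else 0) p)
        (hr - PySem.Int.mod (pvF c * 26 ^ (v.length - 1 - k)) p)
        (by omega) hdropk1.symm hhl' hhr'
      show (PySem.Int.mod (hl + (hr - PySem.Int.mod (pvF c * 26 ^ (v.length - 1 - k)) p)) p) ::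
          pvLoopA p v.length (k + 1) rest _ _ = _
      rw [hhead, htail]
      rw [List.length_cons, List.range_succ_eq_map, List.map_cons, List.map_map]
      congr 1
      apply List.map_congr_left
      intro t _
      simp only [Function.comp_apply]
      congr 1
      omega

lemma pvFwd_spec (p : Int) :
    ∀ (v : List Int) (acc : List Int) (h H : Int), Int.ModEq p h H →
      ∃ q : List Int,
        (v.foldl (fun (st : List Int × Int) x =>
            (st.1 ++ [PySem.Int.mod (st.2 * 26 + x) p], PySem.Int.mod (st.2 * 26 + x) p)) (acc, h)).1
          = acc ++ q ∧
        q.length = v.length ∧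
        ∀ j, j < v.length → Int.ModEq p (q.getD j 0) (H * 26 ^ (j + 1) + pvH (v.take (j + 1))) := by
  intro v
  induction v with
  | nil =>
      intro acc h H _
      exact ⟨[], by simp, by simp, by intro j hj; simp at hj⟩
  | cons x t ih =>
      intro acc h H hH
      have h1 : Int.ModEq p (PySem.Int.mod (h * 26 + x) p) (H * 26 + x) :=
        (pvMod_modEq _ p).trans (Int.ModEq.add_right x (Int.ModEq.mul_right 26 hH))
      obtain ⟨q, hq1, hq2, hq3⟩ :=
        ih (acc ++ [PySem.Int.mod (h * 26 + x) p]) (PySem.Int.mod (h * 26 + x) p) (H * 26 + x) h1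
      refine ⟨PySem.Int.mod (h * 26 + x) p :: q, ?_, by simp [hq2], ?_⟩
      · simpa using hq1
      · intro j hj
        cases j with
        | zero =>
            have : H * 26 ^ (0 + 1) + pvH ((x :: t).take (0 + 1)) = H * 26 + x := by
              simp [pvH]
            rw [this]
            simpa using h1
        | succ j =>
            have hjt : j < t.length := by simpa using hj
            have htk : (t.take (j + 1)).length = j + 1 := by
              simp; omega
            have : H * 26 ^ (j + 1 + 1) + pvH ((x :: t).take (j + 1 + 1))
                = (H * 26 + x) * 26 ^ (j + 1) + pvH (t.take (j + 1)) := by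
              rw [List.take_succ_cons, pvH_cons, htk]
              ring
            rw [this]
            simpa using hq3 j hjt

lemma pvBwd_spec (p : Int) (hp : p ≠ 0) :
    ∀ (w u : List Int), u.length = w.length →
      ∃ S P,
        ((u.zip w).foldr (fun hv (st : List Int × Int × Int) =>
            (st.1 ++ [PySem.Int.mod (hv.1 * st.2.2 + st.2.1) p],
             PySem.Int.mod (st.2.1 + hv.2 * st.2.2) p,
             PySem.Int.mod (st.2.2 * 26) p)) ([], 0, 1))
          = (((List.range w.length).map
              (fun j => PySem.Int.mod (u.getD j 0 * 26 ^ (w.length - 1 - j) + pvH (w.drop (j + 1))) p)).reverse,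
             S, P) ∧
        Int.ModEq p S (pvH w) ∧ Int.ModEq p P (26 ^ w.length) := by
  intro w
  induction w with
  | nil =>
      intro u hu
      have hunil : u = [] := List.eq_nil_of_length_eq_zero (by simpa using hu)
      subst hunil
      exact ⟨0, 1, by simp, by simp [pvH], by simp⟩
  | cons b w' ih =>
      intro u hu
      obtain ⟨a, u', rfl⟩ : ∃ a u', u = a :: u' := by
        cases u with
        | nil => simp at hu
        | cons a u' => exact ⟨a, u', rfl⟩
      have hu' : u'.length = w'.length := by simpa using hu
      obtain ⟨S', P', hres, hS, hP⟩ := ih u' hu'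
      refine ⟨PySem.Int.mod (S' + b * P') p, PySem.Int.mod (P' * 26) p, ?_, ?_, ?_⟩
      · simp only [List.zip_cons_cons, List.foldr_cons, hres]
        refine congrArg (fun r => (r, PySem.Int.mod (S' + b * P') p, PySem.Int.mod (P' * 26) p)) ?_
        rw [List.length_cons, List.range_succ_eq_map, List.map_cons, List.reverse_cons,
          List.map_map]
        congr 1
        · congr 1
          apply List.map_congr_left
          intro t _
          have he : w'.length + 1 - 1 - (t + 1) = w'.length - 1 - t := by omega
          simp only [Function.comp_apply, Nat.succ_eq_add_one, List.getD_cons_succ,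
            List.drop_succ_cons, he]
        · simp only [List.getD_cons_zero, List.drop_succ_cons, List.drop_zero]
          have he : w'.length + 1 - 1 - 0 = w'.length := by omega
          rw [he]
          exact congrArg (fun z => [z])
            (pvModCongr hp (Int.ModEq.add (Int.ModEq.mul_left a hP) hS))
      · refine (pvMod_modEq _ p).trans ?_
        have hc : pvH (b :: w') = pvH w' + b * 26 ^ w'.length := by rw [pvH_cons]; ring
        rw [hc]
        exact Int.ModEq.add hS (Int.ModEq.mul_left b hP)
      · refine (pvMod_modEq _ p).trans ?_
        rw [List.length_cons, pow_succ]
        exact Int.ModEq.mul_right 26 hP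

lemma hashes_eq_target (s : String) (p : Int) (hp : p ≠ 0) :
    hashes s p = (List.range s.toList.length).map (fun i => pvTarget (s.toList.map pvF) p i) := by
  unfold hashes
  have hhr : Int.ModEq p (pvHashA s p) (pvH (s.toList.map pvF)) := by
    have h0 := pvHashA_cong p s.toList.reverse 0 0
    unfold pvHashA
    have hz : ((0 : Nat) : Int) = (0 : Int) := by norm_num
    rw [hz] at h0
    refine h0.trans ?_
    rw [List.map_reverse, pvE_reverse]
    simp
  have h := pvLoopA_spec p hp (s.toList.map pvF) s.toList 0 0 (pvHashA s p)
    (by simp) (by simp) (by intro _; simp [pvH]) (by simpa using hhr)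
  rw [List.length_map] at h
  rw [h]
  simp

lemma hashes_alt_eq_target (s : String) (p : Int) (hp : p ≠ 0) :
    hashes_alt s p = (List.range s.toList.length).map (fun i => pvTarget (s.toList.map pvF) p i) := by
  simp only [hashes_alt]
  have hfv : s.toList.map (fun c => ((c.toNat : Int) - 97) + 1) = s.toList.map pvF := rfl
  rw [hfv]
  obtain ⟨q, hq1, hq2, hq3⟩ := pvFwd_spec p (s.toList.map pvF) [0] 0 0 (Int.ModEq.refl 0)
  rw [hq1]
  have hq2' : q.length = s.toList.length := by simpa using hq2
  have hulen : ([(0 : Int)] ++ q).dropLast.length = s.toList.length := by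
    simp [hq2']
  have hzip : ([(0 : Int)] ++ q).dropLast.reverse.zip (s.toList.map pvF).reverse
      = (([(0 : Int)] ++ q).dropLast.zip (s.toList.map pvF)).reverse := by
    refine (List.zip_of_prod ?_ ?_).symm
    · rw [List.map_reverse, List.map_fst_zip]
      have h2 := hq2'
      simp at h2 ⊢
      omega
    · rw [List.map_reverse, List.map_snd_zip]
      have h2 := hq2'
      simp at h2 ⊢
      omega
  rw [hzip]
  simp only [List.foldl_reverse]
  obtain ⟨S, P, hres, _, _⟩ := pvBwd_spec p hp (s.toList.map pvF) ([(0 : Int)] ++ q).dropLast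
    (by simpa using hulen)
  rw [hres]
  simp only [List.reverse_reverse, List.length_map]
  apply List.map_congr_left
  intro j hj
  rw [List.mem_range] at hj
  have hjs : j < s.length := by simpa using hj
  have hqn : q.length = s.length := by simpa using hq2
  have hjlt : j < ([(0 : Int)] ++ q).dropLast.length := by simp; omega
  have hgd : ([(0 : Int)] ++ q).dropLast.getD j 0 = ([(0 : Int)] ++ q).getD j 0 := by
    rw [List.getD_eq_getElem _ _ hjlt, List.getElem_dropLast,
      List.getD_eq_getElem _ _ (by simp; omega)]
  have hu : Int.ModEq p (([(0 : Int)] ++ q).dropLast.getD j 0) (pvH ((s.toList.map pvF).take j)) := by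
    rw [hgd]
    cases j with
    | zero => simp [pvH]
    | succ j' =>
        have : ([(0 : Int)] ++ q).getD (j' + 1) 0 = q.getD j' 0 := by simp
        rw [this]
        have h3 := hq3 j' (by simp; omega)
        simpa using h3
  unfold pvTarget
  rw [List.length_map]
  exact pvModCongr hp (Int.ModEq.add_right _ (Int.ModEq.mul_right _ hu))

-- ===== VERDICT (by name: the statement is the Claim_ definition above) =====
theorem hashes_spec : Claim_equal_hashes := by
  intro s p _ hpre
  unfold Spec_hashes
  by_cases hp : p = 0
  · rcases hpre with he | hne
    · simp [hashes, hashes_alt, pvLoopA, he, pvHashA]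
    · exact absurd hp hne
  · rw [hashes_eq_target s p hp, hashes_alt_eq_target s p hp]
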